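-- pv_equiv track=rewrite | github.com/kittilsenstian-debug/the-hand | theory-tools/e8_wall_functional_determinant.py | sigma_k
-- ===== SOURCE A (Python) =====
-- def sigma_k(n, k):
--     s = 0
--     for d in range(1, int(n ** 0.5) + 1):
--         if n % d == 0:
--             s += d ** k
--             if d != n // d:
--                 s += (n // d) ** k
--     return s
-- ===== SOURCE B (Python) =====
-- def sigma_k(n, k):
--     # multiplicative: factor n = prod p**e and take prod of geometric sums sum_j p**(j*k)
--     if n == 0:
--         return 0
--     s = 1
--     m = n
--     p = 2
--     while p * p <= m:
--         if m % p == 0: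
--             e = 0
--             while m % p == 0:
--                 m //= p
--                 e += 1
--             s *= sum(p ** (j * k) for j in range(e + 1))
--         p += 1
--     if m > 1:
--         s *= 1 + m ** k
--     return s
-- ===== Notes on version B (the rewrite author's own statement) =====
-- stated objective: alternative
-- what changed: B computes sigma_k multiplicatively: it factors n by trial division into prime powers p**e and multiplies the geometric sums sum_{j<=e} p**(j*k), instead of A's sqrt-bounded divisor-pair scan with complement terms n//d.
-- outside the precondition, e.g. on sigma_k(6, -1): A returns 2.0, B returns 2.0
import Mathlib
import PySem

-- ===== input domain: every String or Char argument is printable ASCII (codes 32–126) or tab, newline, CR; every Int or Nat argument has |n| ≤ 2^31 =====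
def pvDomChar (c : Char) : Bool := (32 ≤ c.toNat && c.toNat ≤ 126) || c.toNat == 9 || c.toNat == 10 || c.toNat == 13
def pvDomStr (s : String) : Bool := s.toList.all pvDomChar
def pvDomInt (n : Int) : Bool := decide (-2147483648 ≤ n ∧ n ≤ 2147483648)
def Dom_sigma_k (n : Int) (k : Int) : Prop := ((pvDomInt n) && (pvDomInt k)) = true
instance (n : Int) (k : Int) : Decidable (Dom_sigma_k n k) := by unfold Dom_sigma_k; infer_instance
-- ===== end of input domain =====

-- B computes sigma_k multiplicatively (trial-division factorisation n = prod p^e, then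
-- the product of the geometric sums sum_j p^(j*k)) instead of A's divisor-pair scan.

-- ===== PORT A =====
-- int(n ** 0.5) is ported as Int.sqrt: exact for 0 ≤ n ≤ 2^31 (CPython's float sqrt is
-- exact there); d ** k is ported as d ^ k.toNat, exact under Pre_ (0 ≤ k, or n = 0 where
-- the loop body never runs).
def sigma_k (n : Int) (k : Int) : Int :=
  (PySem.List.pyRange 1 (Int.sqrt n + 1) 1).foldl
    (fun s d =>
      if PySem.Int.mod n d = 0 then
        let s1 := s + d ^ k.toNat
        if d ≠ PySem.Int.floordiv n d then s1 + (PySem.Int.floordiv n d) ^ k.toNat else s1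
      else s) 0

-- ===== PORT B =====
-- Source B's inner 'while m % p == 0: m //= p; e += 1'; the fuel argument and the 2 ≤ p /
-- 0 < m guards only make the recursion total (fuel = m suffices: m shrinks every step)
def stripFac (fuel p m e : ℕ) : ℕ × ℕ :=
  match fuel with
  | 0 => (e, m)
  | fuel + 1 =>
    if 2 ≤ p ∧ 0 < m ∧ m % p = 0 then stripFac fuel p (m / p) (e + 1) else (e, m)

-- Source B's 'sum(p ** (j * k) for j in range(e + 1))'
def geomList (K p e : ℕ) : Int := ((List.range (e + 1)).map (fun j => (p : Int) ^ (j * K))).sum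

-- Source B's outer 'while p * p <= m' trial-division loop; returns (s, remaining m)
-- (fuel only makes it total: fuel ≥ m + 1 - p suffices since p grows and m never grows)
def outerLoop (fuel K p m : ℕ) (s : Int) : Int × ℕ :=
  match fuel with
  | 0 => (s, m)
  | fuel + 1 =>
    if 2 ≤ p ∧ p * p ≤ m then
      if m % p = 0 then
        let r := stripFac m p m 0
        outerLoop fuel K (p + 1) r.2 (s * geomList K p r.1)
      else outerLoop fuel K (p + 1) m s
    else (s, m)

def sigma_k_alt (n : Int) (k : Int) : Int :=
  if n = 0 then 0
  else
    let r := outerLoop (n.toNat + 1) k.toNat 2 n.toNat 1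
    if 1 < r.2 then r.1 * (1 + (r.2 : Int) ^ k.toNat) else r.1

-- ===== PRECONDITION & SPEC =====
-- Pre_ excludes n < 0 (A raises TypeError: int() of the complex n**0.5) and k < 0 with
-- n ≥ 1 (A returns a float such as 2.0, not an int).
def Pre_sigma_k (n : Int) (k : Int) : Prop := 0 ≤ n ∧ (0 ≤ k ∨ n = 0)
instance (n : Int) (k : Int) : Decidable (Pre_sigma_k n k) := by unfold Pre_sigma_k; infer_instance
def pvWitness_sigma_k : Int × Int := (12, 2)

def Spec_sigma_k (n : Int) (k : Int) (out : Int) : Prop := out = sigma_k_alt n k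
instance (n : Int) (k : Int) (out : Int) : Decidable (Spec_sigma_k n k out) := by unfold Spec_sigma_k; infer_instance

-- ===== CLAIM (what is proved, stated in full; the proofs are below) =====
def Claim_equal_sigma_k : Prop := ∀ (n : Int) (k : Int), Dom_sigma_k n k → Pre_sigma_k n k → Spec_sigma_k n k (sigma_k n k)

-- ===== LEMMAS AND PROOFS =====

theorem foldl_ext {α β : Type} (f g : β → α → β) (h : ∀ b a, f b a = g b a)
    (l : List α) (init : β) : l.foldl f init = l.foldl g init := by
  have hfg : f = g := by funext b a; exact h b a
  rw [hfg]

theorem sum_map_list_range {M : Type} [AddCommMonoid M] (f : ℕ → M) (N : ℕ) :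
    ((List.range N).map f).sum = ∑ i ∈ Finset.range N, f i := by
  induction N with
  | zero => simp
  | succ N ih => simp [List.range_succ, Finset.sum_range_succ, ih]

theorem sum_range_shift (F : ℕ → ℤ) (m : ℕ) :
    ∑ i ∈ Finset.range m, F (1 + i) = ∑ d ∈ Finset.Icc 1 m, F d := by
  induction m with
  | zero => simp
  | succ N ih =>
    rw [Finset.sum_range_succ, ih, Finset.sum_Icc_succ_top (by omega), Nat.add_comm 1 N]

theorem filter_Icc_sqrt_eq (m : ℕ) :
    (Finset.Icc 1 (Nat.sqrt m)).filter (· ∣ m)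
      = m.divisors.filter (· ≤ Nat.sqrt m) := by
  rcases Nat.eq_zero_or_pos m with hm | hm
  · subst hm; simp
  · ext d
    simp only [Finset.mem_filter, Finset.mem_Icc, Nat.mem_divisors]
    constructor
    · rintro ⟨⟨h1, h2⟩, hd⟩; exact ⟨⟨hd, by omega⟩, h2⟩
    · rintro ⟨⟨hd, _⟩, h2⟩
      exact ⟨⟨Nat.pos_of_dvd_of_pos hd hm, h2⟩, hd⟩

-- the divisor-pairing identity: summing f over small divisors together with their
-- complements m/d (skipped when d = m/d) is summing f over all divisors
theorem divisor_pairing (m : ℕ) (f : ℕ → Int) :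
    ∑ d ∈ m.divisors.filter (· ≤ Nat.sqrt m),
        (f d + if d ≠ m / d then f (m / d) else 0)
      = ∑ d ∈ m.divisors, f d := by
  rcases Nat.eq_zero_or_pos m with hm | hm
  · subst hm; simp
  have hm0 : m ≠ 0 := by omega
  have hs1 : Nat.sqrt m * Nat.sqrt m ≤ m := by
    have h := Nat.sqrt_le' m; nlinarith
  have hs2 : m < (Nat.sqrt m + 1) * (Nat.sqrt m + 1) := by
    have h := Nat.lt_succ_sqrt' m; nlinarith [h]
  rw [Finset.sum_add_distrib]
  rw [← Finset.sum_filter_add_sum_filter_not m.divisors (· ≤ Nat.sqrt m) f]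
  congr 1
  rw [← Finset.sum_filter]
  refine Finset.sum_nbij' (i := fun d => m / d) (j := fun e => m / e) ?_ ?_ ?_ ?_ ?_
  · intro d hd
    simp only [Finset.mem_filter, Nat.mem_divisors] at hd ⊢
    obtain ⟨⟨⟨hdvd, _⟩, hle⟩, hne⟩ := hd
    have hq : d * (m / d) = m := Nat.mul_div_cancel' hdvd
    refine ⟨⟨Nat.div_dvd_of_dvd hdvd, hm0⟩, ?_⟩
    intro hqle
    have hd0 : 0 < d := by
      rcases Nat.eq_zero_or_pos d with h0 | h0
      · subst h0; simp at hq; omega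
      · exact h0
    rcases Nat.lt_or_ge d (m / d) with h | h
    · have hq0 : 0 < m / d := by omega
      nlinarith [mul_lt_mul_of_pos_right h hq0, Nat.mul_le_mul hqle hqle]
    · have hlt : m / d < d := by omega
      nlinarith [mul_lt_mul_of_pos_left hlt hd0, Nat.mul_le_mul hle hle]
  · intro e he
    simp only [Finset.mem_filter, Nat.mem_divisors] at he ⊢
    obtain ⟨⟨hdvd, _⟩, hgt⟩ := he
    have hq : e * (m / e) = m := Nat.mul_div_cancel' hdvd
    have hle : m / e ≤ Nat.sqrt m := by
      by_contra h
      nlinarith [Nat.mul_le_mul (show Nat.sqrt m + 1 ≤ e by omega)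
        (show Nat.sqrt m + 1 ≤ m / e by omega)]
    refine ⟨⟨⟨Nat.div_dvd_of_dvd hdvd, hm0⟩, hle⟩, ?_⟩
    have hdds : m / (m / e) = e := Nat.div_div_self hdvd hm0
    omega
  · intro d hd
    simp only [Finset.mem_filter, Nat.mem_divisors] at hd
    exact Nat.div_div_self hd.1.1.1 hm0
  · intro e he
    simp only [Finset.mem_filter, Nat.mem_divisors] at he
    exact Nat.div_div_self he.1.1 hm0
  · intro d _; rfl

theorem stripFac_spec : ∀ fuel p m e : ℕ, 2 ≤ p → 0 < m → m ≤ fuel →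
    m = p ^ ((stripFac fuel p m e).1 - e) * (stripFac fuel p m e).2 ∧
      ¬ p ∣ (stripFac fuel p m e).2 ∧ 0 < (stripFac fuel p m e).2 ∧
      e ≤ (stripFac fuel p m e).1 := by
  intro fuel
  induction fuel with
  | zero => intro p m e _ hm hf; omega
  | succ fuel ih =>
    intro p m e hp hm hf
    by_cases h : 2 ≤ p ∧ 0 < m ∧ m % p = 0
    · simp only [stripFac, if_pos h]
      have hdvd : p ∣ m := Nat.dvd_of_mod_eq_zero h.2.2
      have hmp : 0 < m / p := Nat.div_pos (Nat.le_of_dvd hm hdvd) (by omega)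
      have hlt : m / p < m := Nat.div_lt_self hm (by omega)
      obtain ⟨h1, h2, h3, h4⟩ := ih p (m / p) (e + 1) hp hmp (by omega)
      refine ⟨?_, h2, h3, by omega⟩
      have hE : (stripFac fuel p (m / p) (e + 1)).1 - e
          = ((stripFac fuel p (m / p) (e + 1)).1 - (e + 1)) + 1 := by omega
      rw [hE, pow_succ', mul_assoc, ← h1]
      exact (Nat.mul_div_cancel' hdvd).symm
    · simp only [stripFac, if_neg h]
      refine ⟨by simp, ?_, hm, le_refl e⟩
      intro hdvd
      exact h ⟨hp, hm, Nat.dvd_iff_mod_eq_zero.mp hdvd⟩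

theorem geom_eq_sigma_pp (K p e : ℕ) (hp : p.Prime) :
    geomList K p e = ∑ d ∈ (p ^ e).divisors, (d : Int) ^ K := by
  unfold geomList
  rw [sum_map_list_range, Nat.divisors_prime_pow hp, Finset.sum_map]
  refine Finset.sum_congr rfl fun j _ => ?_
  simp only [Function.Embedding.coeFn_mk]
  push_cast
  rw [← pow_mul]

theorem sigInt_mul (K a b : ℕ) (h : Nat.Coprime a b) :
    (∑ d ∈ (a * b).divisors, (d : Int) ^ K)
      = (∑ d ∈ a.divisors, (d : Int) ^ K) * (∑ d ∈ b.divisors, (d : Int) ^ K) := by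
  have hcast : ∀ n : ℕ, (∑ d ∈ n.divisors, (d : Int) ^ K)
      = ((ArithmeticFunction.sigma K n : ℕ) : Int) := by
    intro n
    rw [ArithmeticFunction.sigma_apply]
    push_cast
    rfl
  rw [hcast, hcast, hcast,
    (ArithmeticFunction.isMultiplicative_sigma (k := K)).map_mul_of_coprime h]
  push_cast
  ring

-- when the loop stops (no divisor candidate left below √m), m is 1 or prime and the
-- final 'if m > 1: s *= 1 + m**k' correction multiplies s by σ_K(m)
theorem exit_case (K p m : ℕ) (s : Int) (hp : 2 ≤ p) (hm : 0 < m)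
    (hmin : ∀ q : ℕ, q.Prime → q ∣ m → p ≤ q) (hbig : m < p * p) :
    (if 1 < m then s * (1 + (m : Int) ^ K) else s)
      = s * ∑ d ∈ m.divisors, (d : Int) ^ K := by
  rcases Nat.lt_or_ge 1 m with h1 | h1
  · have hprime : m.Prime := by
      by_contra hnp
      have hsq := Nat.minFac_sq_le_self hm hnp
      have h2 := hmin _ (Nat.minFac_prime (by omega)) (Nat.minFac_dvd m)
      have h3 : p * p ≤ m := by nlinarith [hsq]
      omega
    rw [if_pos h1, hprime.divisors, Finset.sum_pair (by omega : (1 : ℕ) ≠ m)]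
    push_cast
    ring
  · have hm1 : m = 1 := by omega
    subst hm1
    rw [if_neg (by omega), Nat.divisors_one]
    simp

-- loop invariant of the trial-division loop: as long as m has no prime factor below p
-- (and the fuel is sufficient), finishing the loop and applying the final correction
-- multiplies s by σ_K(m)
theorem outer_invariant (K : ℕ) : ∀ fuel p m : ℕ, ∀ s : Int, 2 ≤ p → 0 < m →
    m + 1 - p ≤ fuel → (∀ q : ℕ, q.Prime → q ∣ m → p ≤ q) →
    (if 1 < (outerLoop fuel K p m s).2 then
        (outerLoop fuel K p m s).1 * (1 + ((outerLoop fuel K p m s).2 : Int) ^ K)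
      else (outerLoop fuel K p m s).1)
      = s * ∑ d ∈ m.divisors, (d : Int) ^ K := by
  intro fuel
  induction fuel with
  | zero =>
    intro p m s hp hm hf hmin
    have hpp : p ≤ p * p := Nat.le_mul_of_pos_left p (by omega)
    exact exit_case K p m s hp hm hmin (by omega)
  | succ fuel ih =>
    intro p m s hp hm hf hmin
    by_cases hguard : 2 ≤ p ∧ p * p ≤ m
    · by_cases hmod : m % p = 0
      · simp only [outerLoop, if_pos hguard, if_pos hmod]
        have hdvd : p ∣ m := Nat.dvd_of_mod_eq_zero hmod
        have hpp : p.Prime := by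
          have h1 : Nat.minFac p ≤ p := Nat.minFac_le (by omega)
          have h2 : p ≤ Nat.minFac p :=
            hmin _ (Nat.minFac_prime (by omega)) ((Nat.minFac_dvd p).trans hdvd)
          have h3 := Nat.minFac_prime (show p ≠ 1 by omega)
          rwa [show Nat.minFac p = p by omega] at h3
        obtain ⟨hfac, hnd, hm2, -⟩ := stripFac_spec m p m 0 hp hm (le_refl m)
        set r := stripFac m p m 0 with hr
        have hfac' : m = p ^ r.1 * r.2 := by simpa using hfac
        have hmin' : ∀ q : ℕ, q.Prime → q ∣ r.2 → p + 1 ≤ q := by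
          intro q hq hqd
          have hqm : q ∣ m := by rw [hfac']; exact hqd.mul_left _
          have h1 := hmin q hq hqm
          have h2 : q ≠ p := by rintro rfl; exact hnd hqd
          omega
        have hr2m : r.2 ≤ m :=
          Nat.le_of_dvd hm ⟨p ^ r.1, by rw [hfac']; ring⟩
        have hcop : Nat.Coprime (p ^ r.1) r.2 :=
          Nat.Coprime.pow_left _ ((Nat.Prime.coprime_iff_not_dvd hpp).mpr hnd)
        rw [ih (p + 1) r.2 (s * geomList K p r.1) (by omega) hm2 (by omega) hmin',
          hfac', sigInt_mul K _ _ hcop, ← geom_eq_sigma_pp K p r.1 hpp, mul_assoc]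
      · simp only [outerLoop, if_pos hguard, if_neg hmod]
        refine ih (p + 1) m s (by omega) hm (by omega) ?_
        intro q hq hqd
        have h1 := hmin q hq hqd
        have h2 : q ≠ p := by
          rintro rfl
          exact hmod (Nat.dvd_iff_mod_eq_zero.mp hqd)
        omega
    · simp only [outerLoop, if_neg hguard]
      exact exit_case K p m s hp hm hmin (by omega)

-- characterisation of port B: the factorisation product is the divisor-power sum
theorem alt_eq_divisors (n k : Int) (hn : 0 ≤ n) :
    sigma_k_alt n k = ∑ d ∈ n.toNat.divisors, (d : Int) ^ k.toNat := by
  unfold sigma_k_alt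
  by_cases h0 : n = 0
  · subst h0; simp
  · rw [if_neg h0]
    have hinv := outer_invariant k.toNat (n.toNat + 1) 2 n.toNat 1 (le_refl 2)
      (by omega) (by omega) (fun q hq _ => hq.two_le)
    simpa using hinv

-- characterisation of port A: the sqrt-bounded loop sums d^k + (n/d)^k over small divisors
theorem a_eq_pairs (n k : Int) (hn : 0 ≤ n) :
    sigma_k n k = ∑ d ∈ n.toNat.divisors.filter (· ≤ Nat.sqrt n.toNat),
        ((d : Int) ^ k.toNat +
          if d ≠ n.toNat / d then ((n.toNat / d : ℕ) : Int) ^ k.toNat else 0) := by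
  obtain ⟨m, rfl⟩ := Int.eq_ofNat_of_zero_le hn
  unfold sigma_k
  have hsq : Int.sqrt (m : Int) = (Nat.sqrt m : Int) := by
    simp [Int.sqrt]
  rw [hsq, PySem.List.pyRange_one,
    show ((Nat.sqrt m : Int) + 1 - 1).toNat = Nat.sqrt m from by omega, List.foldl_map]
  refine Eq.trans (foldl_ext _
    (fun (x : Int) (y : ℕ) => x +
      (if (1 + y) ∣ m then
          ((((1 + y : ℕ)) : Int) ^ k.toNat +
            if (1 + y) ≠ m / (1 + y) then ((m / (1 + y) : ℕ) : Int) ^ k.toNat else 0)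
        else 0)) ?_ _ _) ?_
  · intro x y
    dsimp only
    have hmod : PySem.Int.mod (m : Int) (1 + (y : Int)) = 0 ↔ (1 + y) ∣ m := by
      rw [PySem.Int.mod_eq_zero_iff_dvd]
      constructor
      · intro h; exact_mod_cast h
      · intro h; exact_mod_cast h
    have hfd : PySem.Int.floordiv (m : Int) (1 + (y : Int))
        = ((m / (1 + y) : ℕ) : Int) := by
      exact_mod_cast PySem.Int.floordiv_natCast m (1 + y)
    by_cases hd : (1 + y) ∣ m
    · rw [if_pos (hmod.mpr hd), if_pos hd, hfd]
      by_cases h2 : (1 + y) ≠ m / (1 + y)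
      · have h2' : (1 + (y : Int)) ≠ ((m / (1 + y) : ℕ) : Int) := by
          intro hh; apply h2; exact_mod_cast hh
        rw [if_pos h2', if_pos h2]
        push_cast
        ring
      · have h2eq : (1 + y) = m / (1 + y) := not_ne_iff.mp h2
        have h2' : ¬ (1 + (y : Int)) ≠ ((m / (1 + y) : ℕ) : Int) :=
          not_ne_iff.mpr (by exact_mod_cast h2eq)
        rw [if_neg h2', if_neg h2]
        push_cast
        ring
    · rw [if_neg (fun h => hd (hmod.mp h)), if_neg hd]
      ring
  · rw [PySem.List.foldl_add, sum_map_list_range, zero_add,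
      show ((m : Int)).toNat = m from by omega]
    refine Eq.trans (sum_range_shift
      (fun d : ℕ => if d ∣ m then
          ((d : Int) ^ k.toNat + if d ≠ m / d then ((m / d : ℕ) : Int) ^ k.toNat else 0)
        else 0) (Nat.sqrt m)) ?_
    rw [← Finset.sum_filter, filter_Icc_sqrt_eq]

-- ===== VERDICT (by name: the statement is the Claim_ definition above) =====
theorem sigma_k_spec : Claim_equal_sigma_k := by
  intro n k _ hpre
  unfold Spec_sigma_k
  rw [a_eq_pairs n k hpre.1, alt_eq_divisors n k hpre.1, divisor_pairing]
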